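-- pv_equiv track=rewrite | github.com/N-ha-1050/atcoder_contest_code | indiv/abc234e.py | solve
-- ===== SOURCE A (Python) =====
-- def solve(X: int) -> int:
--     # 100未満ならその値が答え
--     if X < 100:
--         return X
--
--     # 100以上なら、等差数を小さい順に列挙していく
--     nums = [i for i in range(11, 100)]
--     i = 0
--     while True:
--         n = nums[i]
--         i += 1
--         a = n % 10  # 一の位
--         b = n // 10 % 10  # 十の位
--         d = a + (a - b)  # 次の桁
--         if not (0 <= d < 10):
--             continue
--         k = n * 10 + d
--
--         # X以上なら答え
--         if k >= X:
--             return k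
--
--         nums.append(k)
--     return -1
-- ===== SOURCE B (Python) =====
-- def solve(X: int) -> int:
--     # below 100 every number counts as its own answer
--     if X < 100:
--         return X
--     # number of digits of X, and p = 10**L
--     L, p = 1, 10
--     while p <= X:
--         L += 1
--         p *= 10
--     # the all-nines number of length L is arithmetic (difference 0) and >= X
--     best = p - 1
--     # enumerate every L-digit arithmetic number by first digit and common difference
--     for a in range(1, 10):
--         for r in range(-9, 10):
--             ds = [a + r * i for i in range(L)]
--             if all(0 <= d and d <= 9 for d in ds):
--                 v = 0
--                 for d in ds:
--                     v = 10 * v + d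
--                 if X <= v and v < best:
--                     best = v
--     return best
-- ===== Notes on version B (the rewrite author's own statement) =====
-- stated objective: simpler
-- what changed: A grows a breadth-first queue of digit-extensions starting from all two-digit seeds and scans it until it passes X; B directly enumerates the arithmetic numbers with exactly len(str(X)) digits by first digit and common difference and returns the smallest one >= X (the all-nines number of that length is always such a candidate).
import Mathlib
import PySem

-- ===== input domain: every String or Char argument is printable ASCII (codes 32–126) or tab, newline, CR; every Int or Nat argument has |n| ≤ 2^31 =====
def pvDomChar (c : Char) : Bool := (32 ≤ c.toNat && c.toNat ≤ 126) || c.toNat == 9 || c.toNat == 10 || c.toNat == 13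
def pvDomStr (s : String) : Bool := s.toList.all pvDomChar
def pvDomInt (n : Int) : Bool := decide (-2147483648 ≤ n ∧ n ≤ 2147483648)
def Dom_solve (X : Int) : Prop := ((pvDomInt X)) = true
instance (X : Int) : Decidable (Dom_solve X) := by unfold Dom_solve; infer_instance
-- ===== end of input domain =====

-- B replaces A's breadth-first queue of digit-extensions by a direct closed enumeration of the
-- L-digit arithmetic numbers (first digit × common difference) for L = len(str(X)); objective: simpler.

set_option maxRecDepth 1000000

-- ===== PORT A =====
-- the while-True queue loop; fuel 300 suffices for every |X| ≤ 2^31 (the loop needs ≤ 238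
-- iterations there); fuel-out and the impossible empty-queue read return Python's dead 'return -1'
def solveLoop (X : Int) : Nat → List Int → Int → Int
  | 0, _, _ => -1
  | fuel+1, nums, i =>
    match PySem.List.pyGet? nums i with
    | none => -1
    | some n =>
      let a := PySem.Int.mod n 10
      let b := PySem.Int.mod (PySem.Int.floordiv n 10) 10
      let d := a + (a - b)
      if ¬ (0 ≤ d ∧ d < 10) then solveLoop X fuel nums (i + 1)
      else
        let k := n * 10 + d
        if X ≤ k then k
        else solveLoop X fuel (nums ++ [k]) (i + 1)

def solve (X : Int) : Int :=
  if X < 100 then X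
  else solveLoop X 300 (PySem.List.pyRange 11 100 1) 0

-- ===== PORT B =====
-- while p <= X: L += 1; p *= 10   (0 < p is a totality guard; p starts at 10 and only grows)
def lenLoop (X L p : Int) : Int × Int :=
  if h : 0 < p ∧ p ≤ X then lenLoop X (L + 1) (p * 10) else (L, p)
termination_by (X + 1 - p).toNat
decreasing_by simp_wf; omega

def solve_alt (X : Int) : Int :=
  if X < 100 then X
  else
    let Lp := lenLoop X 1 10
    let L := Lp.1
    let best := Lp.2 - 1
    (PySem.List.pyRange 1 10 1).foldl (fun best a =>
      (PySem.List.pyRange (-9) 10 1).foldl (fun best r =>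
        let ds := (PySem.List.pyRange 0 L 1).map (fun i => a + r * i)
        if ds.all (fun d => decide (0 ≤ d) && decide (d ≤ 9)) then
          let v := ds.foldl (fun v d => 10 * v + d) 0
          if X ≤ v ∧ v < best then v else best
        else best) best) best

-- ===== PRECONDITION & SPEC =====
def Spec_solve (X : Int) (out : Int) : Prop := out = solve_alt X
instance (X : Int) (out : Int) : Decidable (Spec_solve X out) := by unfold Spec_solve; infer_instance

-- ===== CLAIM (what is proved, stated in full; the proofs are below) =====
def Claim_equal_solve : Prop := ∀ (X : Int), Dom_solve X → Spec_solve X (solve X)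

-- ===== LEMMAS AND PROOFS =====

-- the values A's loop produces (valid digit extensions), with the queue always extended (X-independent)
def genA : Nat → List Int → Int → List Int
  | 0, _, _ => []
  | fuel+1, nums, i =>
    match PySem.List.pyGet? nums i with
    | none => []
    | some n =>
      let a := PySem.Int.mod n 10
      let b := PySem.Int.mod (PySem.Int.floordiv n 10) 10
      let d := a + (a - b)
      if ¬ (0 ≤ d ∧ d < 10) then genA fuel nums (i + 1)
      else (n * 10 + d) :: genA fuel (nums ++ [n * 10 + d]) (i + 1)

def LA : List Int := genA 300 (PySem.List.pyRange 11 100 1) 0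

-- LA, written out (proved equal below); it lists every multi-digit arithmetic number < 10^10 in order
def LAlit : List Int := [111, 123, 135, 147, 159, 210, 222, 234, 246, 258, 321, 333, 345, 357, 369, 420, 432, 444, 456, 468, 531, 543, 555, 567, 579, 630, 642, 654, 666, 678, 741, 753, 765, 777, 789, 840, 852, 864, 876, 888, 951, 963, 975, 987, 999, 1111, 1234, 1357, 2222, 2345, 2468, 3210, 3333, 3456, 3579, 4321, 4444, 4567, 5432, 5555, 5678, 6420, 6543, 6666, 6789, 7531, 7654, 7777, 8642, 8765, 8888, 9630, 9753, 9876, 9999, 11111, 12345, 13579, 22222, 23456, 33333, 34567, 43210, 44444, 45678, 54321, 55555, 56789, 65432, 66666, 76543, 77777, 86420, 87654, 88888, 97531, 98765, 99999, 111111, 123456, 222222, 234567, 333333, 345678, 444444, 456789, 543210, 555555, 654321, 666666, 765432, 777777, 876543, 888888, 987654, 999999, 1111111, 1234567, 2222222, 2345678, 3333333, 3456789, 4444444, 5555555, 6543210, 6666666, 7654321, 7777777, 8765432, 8888888, 9876543, 9999999, 11111111, 12345678, 22222222, 23456789, 33333333, 44444444, 55555555, 66666666, 76543210, 77777777, 87654321,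 88888888, 98765432, 99999999, 111111111, 123456789, 222222222, 333333333, 444444444, 555555555, 666666666, 777777777, 876543210, 888888888, 987654321, 999999999, 1111111111, 2222222222, 3333333333, 4444444444, 5555555555, 6666666666, 7777777777, 8888888888, 9876543210, 9999999999, 11111111111, 22222222222, 33333333333, 44444444444, 55555555555, 66666666666, 77777777777, 88888888888, 99999999999, 111111111111, 222222222222, 333333333333, 444444444444, 555555555555, 666666666666, 777777777777, 888888888888, 999999999999, 1111111111111, 2222222222222, 3333333333333, 4444444444444, 5555555555555, 6666666666666, 7777777777777, 8888888888888, 9999999999999, 11111111111111, 22222222222222, 33333333333333, 44444444444444, 55555555555555, 66666666666666, 77777777777777, 88888888888888, 99999999999999, 111111111111111, 222222222222222, 333333333333333, 444444444444444, 555555555555555, 666666666666666, 777777777777777, 888888888888888, 999999999999999, 1111111111111111, 2222222222222222, 3333333333333333, 4444444444444444, 5555555555555555, 6666666666666666, 7777777777777777]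

-- the candidate values B enumerates for digit count L
def vals (L : Int) : List Int :=
  (PySem.List.pyRange 1 10 1).flatMap (fun a =>
    (PySem.List.pyRange (-9) 10 1).filterMap (fun r =>
      let ds := (PySem.List.pyRange 0 L 1).map (fun i => a + r * i)
      if ds.all (fun d => decide (0 ≤ d) && decide (d ≤ 9)) then
        some (ds.foldl (fun v d => 10 * v + d) 0)
      else none))

lemma la_eq : LA = LAlit := by decide

lemma solveLoop_eq_find (X : Int) :
    ∀ (fuel : Nat) (nums : List Int) (i : Int),
      solveLoop X fuel nums i = ((genA fuel nums i).find? (fun k => decide (X ≤ k))).getD (-1) := by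
  intro fuel
  induction fuel with
  | zero => intro nums i; simp [solveLoop, genA]
  | succ f ih =>
    intro nums i
    rw [solveLoop, genA]
    cases h : PySem.List.pyGet? nums i with
    | none => simp
    | some n =>
      simp only
      split
      · exact ih nums (i + 1)
      · rw [List.find?_cons]
        split
        · rename_i hX
          rw [decide_eq_true hX]
          rfl
        · rename_i hX
          rw [decide_eq_false hX]
          exact ih _ _

-- folding B's update never exceeds the start value
lemma foldl_min_le_init (X : Int) :
    ∀ (ys : List Int) (b : Int),
      ys.foldl (fun b v => if X ≤ v ∧ v < b then v else b) b ≤ b := by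
  intro ys
  induction ys with
  | nil => intro b; simp
  | cons y t ih =>
    intro b
    simp only [List.foldl_cons]
    split
    · exact le_trans (ih _) (by omega)
    · exact ih b

-- the fold's result is the start value or an admissible list element
lemma foldl_min_mem (X : Int) :
    ∀ (ys : List Int) (b : Int),
      ys.foldl (fun b v => if X ≤ v ∧ v < b then v else b) b = b ∨
        (ys.foldl (fun b v => if X ≤ v ∧ v < b then v else b) b ∈ ys ∧
          X ≤ ys.foldl (fun b v => if X ≤ v ∧ v < b then v else b) b) := by
  intro ys
  induction ys with
  | nil => intro b; simp
  | cons y t ih =>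
    intro b
    simp only [List.foldl_cons]
    split
    · rcases ih y with h | h
      · right; exact ⟨by simp [h], by rw [h]; omega⟩
      · right; exact ⟨by simp [h.1], h.2⟩
    · rcases ih b with h | h
      · left; exact h
      · right; exact ⟨by simp [h.1], h.2⟩

-- the fold's result is ≤ every admissible list element
lemma foldl_min_le (X : Int) :
    ∀ (ys : List Int) (b : Int) (v : Int), v ∈ ys → X ≤ v →
      ys.foldl (fun b v => if X ≤ v ∧ v < b then v else b) b ≤ v := by
  intro ys
  induction ys with
  | nil => intro b v hv; simp at hv
  | cons y t ih =>
    intro b v hv hX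
    simp only [List.foldl_cons]
    rcases List.mem_cons.mp hv with rfl | hv
    · split
      · exact foldl_min_le_init X t _
      · exact le_trans (foldl_min_le_init X t b) (by omega)
    · split
      · exact ih _ v hv hX
      · exact ih b v hv hX

-- B's nested fold over (a, r) equals the flat fold over the candidate list
lemma nested_fold_eq_vals (X L b0 : Int) :
    (PySem.List.pyRange 1 10 1).foldl (fun best a =>
      (PySem.List.pyRange (-9) 10 1).foldl (fun best r =>
        let ds := (PySem.List.pyRange 0 L 1).map (fun i => a + r * i)
        if ds.all (fun d => decide (0 ≤ d) && decide (d ≤ 9)) then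
          let v := ds.foldl (fun v d => 10 * v + d) 0
          if X ≤ v ∧ v < best then v else best
        else best) best) b0 =
    (vals L).foldl (fun b v => if X ≤ v ∧ v < b then v else b) b0 := by
  rw [vals, List.foldl_flatMap]
  congr 1
  funext b a
  rw [List.foldl_filterMap]
  congr 1
  funext b' r
  simp only []
  split <;> rfl

-- the first element ≥ X of a strictly increasing list is minimal among elements ≥ X
lemma find?_sorted_min (X m : Int) :
    ∀ (l : List Int), l.Pairwise (· < ·) →
      l.find? (fun k => decide (X ≤ k)) = some m →
      ∀ c ∈ l, X ≤ c → m ≤ c := by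
  intro l
  induction l with
  | nil => intro _ h; simp at h
  | cons h t ih =>
    intro hp hf c hc hXc
    rw [List.find?_cons] at hf
    by_cases hXh : X ≤ h
    · simp [hXh] at hf
      subst hf
      rcases List.mem_cons.mp hc with rfl | hc
      · exact le_refl _
      · exact le_of_lt ((List.pairwise_cons.mp hp).1 c hc)
    · simp [hXh] at hf
      rcases List.mem_cons.mp hc with rfl | hc
      · omega
      · exact ih (List.pairwise_cons.mp hp).2 hf c hc hXc

lemma la_pairwise : LA.Pairwise (· < ·) := by rw [la_eq]; decide

-- the generic per-digit-count step: on 10^(L0-1) ≤ X < 10^L0 both ports return the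
-- least multi-digit arithmetic number ≥ X
lemma main_case (L0 lo hi X : Int)
    (h100 : 100 ≤ X) (hlo : lo ≤ X) (hhi : X < hi)
    (hlen : lenLoop X 1 10 = (L0, hi))
    (hnine : (hi - 1) ∈ LA)
    (hsub : ∀ c ∈ vals L0, c ∈ LA)
    (hcomp : ∀ k ∈ LA, lo ≤ k → k < hi → k ∈ vals L0) :
    solve X = solve_alt X := by
  have hX100 : ¬ X < 100 := by omega
  have hA : solve X = (LA.find? (fun k => decide (X ≤ k))).getD (-1) := by
    rw [solve, if_neg hX100, solveLoop_eq_find]; rfl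
  have hex : ∃ c ∈ LA, (fun k => decide (X ≤ k)) c = true := ⟨hi - 1, hnine, by simp; omega⟩
  obtain ⟨m, hm⟩ := Option.isSome_iff_exists.mp (List.find?_isSome.mpr hex)
  have hmem : m ∈ LA := List.mem_of_find?_eq_some hm
  have hXm : X ≤ m := by have := List.find?_some hm; simpa using this
  have hmin : ∀ c ∈ LA, X ≤ c → m ≤ c := find?_sorted_min X m LA la_pairwise hm
  have hm9 : m ≤ hi - 1 := hmin _ hnine (by omega)
  have hB : solve_alt X = (vals L0).foldl (fun b v => if X ≤ v ∧ v < b then v else b) (hi - 1) := by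
    rw [solve_alt, if_neg hX100]
    simp only [hlen]
    exact nested_fold_eq_vals X L0 (hi - 1)
  set mB := (vals L0).foldl (fun b v => if X ≤ v ∧ v < b then v else b) (hi - 1) with hmB
  have h1 : m ≤ mB := by
    rcases foldl_min_mem X (vals L0) (hi - 1) with h | h
    · rw [← hmB] at h; omega
    · rw [← hmB] at h; exact hmin mB (hsub mB h.1) h.2
  have h2 : mB ≤ m := by
    have hmv : m ∈ vals L0 := hcomp m hmem (by omega) (by omega)
    exact foldl_min_le X (vals L0) (hi - 1) m hmv hXm
  rw [hA, hm, hB]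
  simp only [Option.getD_some]
  omega

lemma len3 (X : Int) (h1 : 100 ≤ X) (h2 : X < 1000) : lenLoop X 1 10 = (3, 1000) := by
  rw [lenLoop, dif_pos (by omega)]
  rw [lenLoop, dif_pos (by omega)]
  rw [lenLoop, dif_neg (by omega)]
  norm_num

lemma nine3 : ((999 : Int)) ∈ LAlit := by decide

lemma sub3 : ∀ c ∈ vals 3, c ∈ LAlit := by decide

lemma comp3 : ∀ k ∈ LAlit, (100 : Int) ≤ k → k < 1000 → k ∈ vals 3 := by decide

lemma len4 (X : Int) (h1 : 1000 ≤ X) (h2 : X < 10000) : lenLoop X 1 10 = (4, 10000) := by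
  rw [lenLoop, dif_pos (by omega)]
  rw [lenLoop, dif_pos (by omega)]
  rw [lenLoop, dif_pos (by omega)]
  rw [lenLoop, dif_neg (by omega)]
  norm_num

lemma nine4 : ((9999 : Int)) ∈ LAlit := by decide

lemma sub4 : ∀ c ∈ vals 4, c ∈ LAlit := by decide

lemma comp4 : ∀ k ∈ LAlit, (1000 : Int) ≤ k → k < 10000 → k ∈ vals 4 := by decide

lemma len5 (X : Int) (h1 : 10000 ≤ X) (h2 : X < 100000) : lenLoop X 1 10 = (5, 100000) := by
  rw [lenLoop, dif_pos (by omega)]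
  rw [lenLoop, dif_pos (by omega)]
  rw [lenLoop, dif_pos (by omega)]
  rw [lenLoop, dif_pos (by omega)]
  rw [lenLoop, dif_neg (by omega)]
  norm_num

lemma nine5 : ((99999 : Int)) ∈ LAlit := by decide

lemma sub5 : ∀ c ∈ vals 5, c ∈ LAlit := by decide

lemma comp5 : ∀ k ∈ LAlit, (10000 : Int) ≤ k → k < 100000 → k ∈ vals 5 := by decide

lemma len6 (X : Int) (h1 : 100000 ≤ X) (h2 : X < 1000000) : lenLoop X 1 10 = (6, 1000000) := by
  rw [lenLoop, dif_pos (by omega)]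
  rw [lenLoop, dif_pos (by omega)]
  rw [lenLoop, dif_pos (by omega)]
  rw [lenLoop, dif_pos (by omega)]
  rw [lenLoop, dif_pos (by omega)]
  rw [lenLoop, dif_neg (by omega)]
  norm_num

lemma nine6 : ((999999 : Int)) ∈ LAlit := by decide

lemma sub6 : ∀ c ∈ vals 6, c ∈ LAlit := by decide

lemma comp6 : ∀ k ∈ LAlit, (100000 : Int) ≤ k → k < 1000000 → k ∈ vals 6 := by decide

lemma len7 (X : Int) (h1 : 1000000 ≤ X) (h2 : X < 10000000) : lenLoop X 1 10 = (7, 10000000) := by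
  rw [lenLoop, dif_pos (by omega)]
  rw [lenLoop, dif_pos (by omega)]
  rw [lenLoop, dif_pos (by omega)]
  rw [lenLoop, dif_pos (by omega)]
  rw [lenLoop, dif_pos (by omega)]
  rw [lenLoop, dif_pos (by omega)]
  rw [lenLoop, dif_neg (by omega)]
  norm_num

lemma nine7 : ((9999999 : Int)) ∈ LAlit := by decide

lemma sub7 : ∀ c ∈ vals 7, c ∈ LAlit := by decide

lemma comp7 : ∀ k ∈ LAlit, (1000000 : Int) ≤ k → k < 10000000 → k ∈ vals 7 := by decide

lemma len8 (X : Int) (h1 : 10000000 ≤ X) (h2 : X < 100000000) : lenLoop X 1 10 = (8, 100000000) := by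
  rw [lenLoop, dif_pos (by omega)]
  rw [lenLoop, dif_pos (by omega)]
  rw [lenLoop, dif_pos (by omega)]
  rw [lenLoop, dif_pos (by omega)]
  rw [lenLoop, dif_pos (by omega)]
  rw [lenLoop, dif_pos (by omega)]
  rw [lenLoop, dif_pos (by omega)]
  rw [lenLoop, dif_neg (by omega)]
  norm_num

lemma nine8 : ((99999999 : Int)) ∈ LAlit := by decide

lemma sub8 : ∀ c ∈ vals 8, c ∈ LAlit := by decide

lemma comp8 : ∀ k ∈ LAlit, (10000000 : Int) ≤ k → k < 100000000 → k ∈ vals 8 := by decide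

lemma len9 (X : Int) (h1 : 100000000 ≤ X) (h2 : X < 1000000000) : lenLoop X 1 10 = (9, 1000000000) := by
  rw [lenLoop, dif_pos (by omega)]
  rw [lenLoop, dif_pos (by omega)]
  rw [lenLoop, dif_pos (by omega)]
  rw [lenLoop, dif_pos (by omega)]
  rw [lenLoop, dif_pos (by omega)]
  rw [lenLoop, dif_pos (by omega)]
  rw [lenLoop, dif_pos (by omega)]
  rw [lenLoop, dif_pos (by omega)]
  rw [lenLoop, dif_neg (by omega)]
  norm_num

lemma nine9 : ((999999999 : Int)) ∈ LAlit := by decide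

lemma sub9 : ∀ c ∈ vals 9, c ∈ LAlit := by decide

lemma comp9 : ∀ k ∈ LAlit, (100000000 : Int) ≤ k → k < 1000000000 → k ∈ vals 9 := by decide

lemma len10 (X : Int) (h1 : 1000000000 ≤ X) (h2 : X < 10000000000) : lenLoop X 1 10 = (10, 10000000000) := by
  rw [lenLoop, dif_pos (by omega)]
  rw [lenLoop, dif_pos (by omega)]
  rw [lenLoop, dif_pos (by omega)]
  rw [lenLoop, dif_pos (by omega)]
  rw [lenLoop, dif_pos (by omega)]
  rw [lenLoop, dif_pos (by omega)]
  rw [lenLoop, dif_pos (by omega)]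
  rw [lenLoop, dif_pos (by omega)]
  rw [lenLoop, dif_pos (by omega)]
  rw [lenLoop, dif_neg (by omega)]
  norm_num

lemma nine10 : ((9999999999 : Int)) ∈ LAlit := by decide

lemma sub10 : ∀ c ∈ vals 10, c ∈ LAlit := by decide

lemma comp10 : ∀ k ∈ LAlit, (1000000000 : Int) ≤ k → k < 10000000000 → k ∈ vals 10 := by decide

-- ===== VERDICT (by name: the statement is the Claim_ definition above) =====
theorem solve_spec : Claim_equal_solve := by
  unfold Claim_equal_solve Spec_solve
  intro X hdom
  by_cases hX : X < 100
  · rw [solve, if_pos hX, solve_alt, if_pos hX]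
  · have hup : X ≤ 2147483648 := by
      unfold Dom_solve pvDomInt at hdom
      simp only [decide_eq_true_eq] at hdom
      omega
    by_cases h3 : X < 1000
    · exact main_case 3 100 1000 X (by omega) (by omega) (by omega) (len3 X (by omega) (by omega)) (by rw [la_eq]; exact nine3) (by rw [la_eq]; exact sub3) (by rw [la_eq]; exact comp3)
    by_cases h4 : X < 10000
    · exact main_case 4 1000 10000 X (by omega) (by omega) (by omega) (len4 X (by omega) (by omega)) (by rw [la_eq]; exact nine4) (by rw [la_eq]; exact sub4) (by rw [la_eq]; exact comp4)
    by_cases h5 : X < 100000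
    · exact main_case 5 10000 100000 X (by omega) (by omega) (by omega) (len5 X (by omega) (by omega)) (by rw [la_eq]; exact nine5) (by rw [la_eq]; exact sub5) (by rw [la_eq]; exact comp5)
    by_cases h6 : X < 1000000
    · exact main_case 6 100000 1000000 X (by omega) (by omega) (by omega) (len6 X (by omega) (by omega)) (by rw [la_eq]; exact nine6) (by rw [la_eq]; exact sub6) (by rw [la_eq]; exact comp6)
    by_cases h7 : X < 10000000
    · exact main_case 7 1000000 10000000 X (by omega) (by omega) (by omega) (len7 X (by omega) (by omega)) (by rw [la_eq]; exact nine7) (by rw [la_eq]; exact sub7) (by rw [la_eq]; exact comp7)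
    by_cases h8 : X < 100000000
    · exact main_case 8 10000000 100000000 X (by omega) (by omega) (by omega) (len8 X (by omega) (by omega)) (by rw [la_eq]; exact nine8) (by rw [la_eq]; exact sub8) (by rw [la_eq]; exact comp8)
    by_cases h9 : X < 1000000000
    · exact main_case 9 100000000 1000000000 X (by omega) (by omega) (by omega) (len9 X (by omega) (by omega)) (by rw [la_eq]; exact nine9) (by rw [la_eq]; exact sub9) (by rw [la_eq]; exact comp9)
    exact main_case 10 1000000000 10000000000 X (by omega) (by omega) (by omega) (len10 X (by omega) (by omega)) (by rw [la_eq]; exact nine10) (by rw [la_eq]; exact sub10) (by rw [la_eq]; exact comp10)
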